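-- pv_equiv track=rewrite | github.com/lwang114/MultimodalWordDiscovery | utils/audio_preprocess.py | _map_transcripts
-- ===== SOURCE A (Python) =====
-- def _map_transcripts(trg_sent, ref_sent):
--   trg2ref = [[] for i in range(len(trg_sent))]
--   ref2trg = [[] for i in range(len(ref_sent))]
--
--   # Find all the exact match of words in the two transcriptions
--   for i_t, tw in enumerate(trg_sent):
--     for i_r, rw in enumerate(ref_sent):
--       if tw == rw and len(ref2trg[i_r]) == 0:
--         trg2ref[i_t].append(i_r)
--         ref2trg[i_r].append(i_t)
--         break
--
--   # Find the match for compound nouns (assume compound nouns appear in isolation)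
--   # TODO: handle the case when two compound nouns appear in adjacence
--   for i_t, tw in enumerate(trg_sent):
--     if len(trg2ref[i_t]) == 0:
--       # Find the first consecutive strings of word in the ref sent
--       # that does not align to any words
--       st = -1
--       for i_r, rw in enumerate(ref_sent):
--         if len(ref2trg[i_r]) == 0:
--           st = i_r
--           break
--
--       for i_r, rw in enumerate(ref_sent[st:]):
--         if len(ref2trg[st+i_r]) > 0:
--           break
--         trg2ref[i_t].append(st+i_r)
--         ref2trg[st+i_r].append(i_t)
--
--   return trg2ref, ref2trg
-- ===== SOURCE B (Python) =====
-- def _map_transcripts(trg_sent, ref_sent):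
--   # Phase 1: exact matches via a precomputed word -> ref-occurrence index list
--   # plus a per-word cursor, instead of rescanning ref_sent per target word.
--   occ = {}
--   for j, rw in enumerate(ref_sent):
--     occ.setdefault(rw, []).append(j)
--   seen = {}
--   trg2ref = []
--   ref2trg = [[] for _ in ref_sent]
--   for i_t, tw in enumerate(trg_sent):
--     n = seen.get(tw, 0)
--     seen[tw] = n + 1
--     pos = occ.get(tw, [])
--     if n < len(pos):
--       j = pos[n]
--       trg2ref.append([j])
--       ref2trg[j].append(i_t)
--     else:
--       trg2ref.append([])
--   # Phase 2: assign each still-unmatched target the next contiguous block of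
--   # unmatched ref words, tracked with a monotone pointer (no rescan from 0).
--   p = 0
--   R = len(ref_sent)
--   for i_t in range(len(trg_sent)):
--     if trg2ref[i_t]:
--       continue
--     while p < R and ref2trg[p]:
--       p += 1
--     q = p
--     while q < R and not ref2trg[q]:
--       ref2trg[q].append(i_t)
--       q += 1
--     trg2ref[i_t] = list(range(p, q))
--     p = q
--   return trg2ref, ref2trg
-- ===== Notes on version B (the rewrite author's own statement) =====
-- stated objective: faster
-- what changed: Phase 1's per-target rescan of ref_sent is replaced by a precomputed word-to-occurrence-index dictionary with a per-word cursor, and phase 2's repeated from-zero scan for the first unmatched ref position is replaced by a monotone pointer, turning the O(T*R) double loops into O(T+R) passes.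
import Mathlib
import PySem

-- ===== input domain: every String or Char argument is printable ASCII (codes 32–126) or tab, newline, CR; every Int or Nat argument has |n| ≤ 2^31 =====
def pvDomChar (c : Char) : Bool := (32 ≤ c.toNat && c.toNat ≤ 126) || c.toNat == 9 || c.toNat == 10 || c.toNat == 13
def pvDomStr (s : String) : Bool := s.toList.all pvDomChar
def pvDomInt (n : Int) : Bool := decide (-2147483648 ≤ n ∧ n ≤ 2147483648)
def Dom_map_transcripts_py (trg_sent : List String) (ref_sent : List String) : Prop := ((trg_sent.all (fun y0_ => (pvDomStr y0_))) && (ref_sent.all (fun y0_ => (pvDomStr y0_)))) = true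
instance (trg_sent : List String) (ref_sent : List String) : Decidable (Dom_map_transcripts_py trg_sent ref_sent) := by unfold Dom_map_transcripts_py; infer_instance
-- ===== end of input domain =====

-- B replaces A's per-target rescans of ref_sent by a precomputed word→occurrence index
-- (phase 1) and a monotone pointer over ref_sent (phase 2): O(T+R) instead of O(T·R).

-- ===== PORT A =====
-- shared small helpers (Python `l[i].append(v)` on a list of lists, in-range nonneg index)
def setApp (l : List (List Int)) (i : Nat) (v : Int) : List (List Int) :=
  l.set i (l.getD i [] ++ [v])

-- Python index that may be negative (A's `ref2trg[st+i_r]` with st possibly -1)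
def pyIdxN (len : Nat) (i : Int) : Nat := if i < 0 then len - i.natAbs else i.toNat

def setAppI (l : List (List Int)) (i : Int) (v : Int) : List (List Int) :=
  setApp l (pyIdxN l.length i) v

-- inner loop of A's phase 1: first i_r with tw == rw and ref2trg[i_r] empty
def findMatchA (tw : String) : List String → List (List Int) → Nat → Option Nat
  | [], _, _ => none
  | rw :: rs, r2t, i =>
    if tw = rw ∧ r2t.getD i [] = [] then some i else findMatchA tw rs r2t (i + 1)

-- A's phase-1 loop over enumerate(trg_sent)
def phase1A (ref : List String) :
    List String → Nat → List (List Int) × List (List Int) → List (List Int) × List (List Int)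
  | [], _, s => s
  | tw :: ts, i_t, s =>
    phase1A ref ts (i_t + 1)
      (match findMatchA tw ref s.2 0 with
       | some j => (setApp s.1 i_t (j : Int), setApp s.2 j (i_t : Int))
       | none => s)

-- A's scan for the first unmatched ref position (st = -1 if none)
def findStA : List String → List (List Int) → Nat → Int
  | [], _, _ => -1
  | _ :: rs, r2t, i => if r2t.getD i [] = [] then (i : Int) else findStA rs r2t (i + 1)

-- A's inner loop over ref_sent[st:] with `break`
def blockA : List String → Int → Nat → Nat → List (List Int) × List (List Int) → List (List Int) × List (List Int)
  | [], _, _, _, s => s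
  | _ :: rest, st, i_r, i_t, s =>
    if ¬ (PySem.List.pyGetD s.2 (st + (i_r : Int)) [] = []) then s
    else blockA rest st (i_r + 1) i_t
      (setApp s.1 i_t (st + (i_r : Int)), setAppI s.2 (st + (i_r : Int)) (i_t : Int))

-- A's phase-2 loop over enumerate(trg_sent)
def phase2A (ref : List String) :
    List String → Nat → List (List Int) × List (List Int) → List (List Int) × List (List Int)
  | [], _, s => s
  | _ :: ts, i_t, s =>
    phase2A ref ts (i_t + 1)
      (if s.1.getD i_t [] = [] then
        let st := findStA ref s.2 0
        blockA (PySem.List.slice ref (some st) none) st 0 i_t s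
      else s)

def map_transcripts_py (trg_sent : List String) (ref_sent : List String) :
    List (List Int) × List (List Int) :=
  phase2A ref_sent trg_sent 0
    (phase1A ref_sent trg_sent 0
      (List.replicate trg_sent.length [], List.replicate ref_sent.length []))

-- ===== PORT B =====
-- occ: word → list of its ref indices (Python: occ.setdefault(rw, []).append(j))
def occB (ref : List String) : PySem.Dict String (List Int) :=
  ((PySem.List.enumerate ref).map (fun p => (p.2, p.1))).foldl
    (fun d p => d.modify p.1 [] (· ++ [p.2])) PySem.Dict.empty

-- B's phase-1 loop: per-word cursor `seen` into the static occurrence lists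
def phase1B (occ : PySem.Dict String (List Int)) :
    List String → Nat → List (List Int) → List (List Int) → PySem.Dict String Int →
    List (List Int) × List (List Int)
  | [], _, t2r, r2t, _ => (t2r, r2t)
  | tw :: ts, i_t, t2r, r2t, seen =>
    let n := seen.getD tw 0
    let seen' := seen.insert tw (n + 1)
    let pos := occ.getD tw []
    if n < (pos.length : Int) then
      let j := (PySem.List.pyGet? pos n).getD 0
      phase1B occ ts (i_t + 1) (t2r ++ [[j]]) (setApp r2t j.toNat (i_t : Int)) seen'
    else
      phase1B occ ts (i_t + 1) (t2r ++ [[]]) r2t seen'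

-- B's monotone pointer: skip matched ref positions
def skipB (r2t : List (List Int)) (p : Nat) : Nat :=
  if h : p < r2t.length then
    (if r2t.getD p [] = [] then p else skipB r2t (p + 1))
  else p
termination_by r2t.length - p
decreasing_by omega

-- B's run assignment: append i_t to every ref slot of the unmatched block
def runB (r2t : List (List Int)) (q : Nat) (it : Int) : List (List Int) × Nat :=
  if h : q < r2t.length ∧ r2t.getD q [] = [] then
    runB (setApp r2t q it) (q + 1) it
  else (r2t, q)
termination_by r2t.length - q
decreasing_by simp only [setApp, List.length_set]; omega

-- B's phase-2 loop over range(len(trg_sent)) with pointer p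
def phase2B : List String → Nat → Nat → List (List Int) × List (List Int) → List (List Int) × List (List Int)
  | [], _, _, s => s
  | _ :: ts, i_t, p, s =>
    if ¬ (s.1.getD i_t [] = []) then phase2B ts (i_t + 1) p s
    else
      let p' := skipB s.2 p
      let r := runB s.2 p' (i_t : Int)
      phase2B ts (i_t + 1) r.2 (s.1.set i_t (PySem.List.pyRange (p' : Int) (r.2 : Int) 1), r.1)

def map_transcripts_py_alt (trg_sent : List String) (ref_sent : List String) :
    List (List Int) × List (List Int) :=
  phase2B trg_sent 0 0
    (phase1B (occB ref_sent) trg_sent 0 [] (List.replicate ref_sent.length []) PySem.Dict.empty)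

-- ===== PRECONDITION & SPEC =====
def Spec_map_transcripts_py (trg_sent : List String) (ref_sent : List String) (out : List (List Int) × List (List Int)) : Prop := out = map_transcripts_py_alt trg_sent ref_sent
instance (trg_sent : List String) (ref_sent : List String) (out : List (List Int) × List (List Int)) : Decidable (Spec_map_transcripts_py trg_sent ref_sent out) := by unfold Spec_map_transcripts_py; infer_instance

-- ===== CLAIM (what is proved, stated in full; the proofs are below) =====
def Claim_equal_map_transcripts_py : Prop := ∀ (trg_sent : List String) (ref_sent : List String), Dom_map_transcripts_py trg_sent ref_sent → Spec_map_transcripts_py trg_sent ref_sent (map_transcripts_py trg_sent ref_sent)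

-- ===== LEMMAS AND PROOFS =====
def occIdx (ref : List String) (w : String) : List Nat :=
  (List.range ref.length).filter (fun j => ref.getD j "" == w)
theorem occIdx_nodup (ref : List String) (w : String) : (occIdx ref w).Nodup :=
  (List.nodup_range).filter _
theorem occB_getD (ref : List String) (w : String) :
    (occB ref).getD w [] = (occIdx ref w).map (fun (j : Nat) => (j : Int)) := by
  unfold occB occIdx
  rw [PySem.Dict.getD_foldl_modify_append]
  rw [PySem.List.enumerate_eq_map_pyRange ref ""]
  simp [PySem.List.len, PySem.List.pyRange_zero_natCast, List.map_map, List.filter_map,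
    Function.comp_def, PySem.Dict.getD_empty]
theorem findMatchA_aux (tw : String) (r2t : List (List Int)) :
    ∀ (l : List String) (i : Nat),
      findMatchA tw l r2t i =
        (((List.range l.length).filter
            (fun k => l.getD k "" == tw && r2t.getD (k + i) [] == [])).head?).map (· + i) := by
  intro l
  induction l with
  | nil => intro i; rfl
  | cons rw rs ih =>
    intro i
    rw [findMatchA]
    simp only [List.length_cons, List.range_succ_eq_map, List.filter_cons]
    by_cases h : tw = rw ∧ r2t.getD i [] = []
    · have hb : ((rw :: rs).getD 0 "" == tw && r2t.getD (0 + i) [] == []) = true := by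
        simp only [List.getD_cons_zero, Nat.zero_add, Bool.and_eq_true, beq_iff_eq]
        exact ⟨h.1.symm, h.2⟩
      rw [if_pos h, hb]
      simp
    · have hb : ((rw :: rs).getD 0 "" == tw && r2t.getD (0 + i) [] == []) = false := by
        simp only [List.getD_cons_zero, Nat.zero_add]
        rw [Bool.and_eq_false_iff]
        rcases (Decidable.not_and_iff_or_not ..).mp h with h1 | h1
        · left; simp only [beq_eq_false_iff_ne, ne_eq]; exact fun he => h1 he.symm
        · right; simpa using h1
      rw [if_neg h, hb, ih (i+1)]
      simp only [Bool.false_eq_true, if_false, List.filter_map, List.head?_map, Option.map_map]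
      congr 1
      · funext k
        simp only [Function.comp_def, Nat.succ_eq_add_one]
        omega
      · congr 1
        apply List.filter_congr
        intro k _
        have h2 : k + 1 + i = k + (i + 1) := by omega
        simp [h2]
theorem findMatchA_eq (tw : String) (ref : List String) (r2t : List (List Int)) :
    findMatchA tw ref r2t 0 =
      ((List.range ref.length).filter
          (fun k => ref.getD k "" == tw && r2t.getD k [] == [])).head? := by
  rw [findMatchA_aux]
  simp
theorem filter_split {occ : List Nat} {unm : Nat → Bool} {n : Nat}
    (hnd : occ.Nodup)
    (hold : occ.filter unm = occ.drop n) :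
    (occ.take n).filter unm = [] ∧ (occ.drop n).filter unm = occ.drop n := by
  have hsplit : occ = occ.take n ++ occ.drop n := (List.take_append_drop n occ).symm
  have hf : (occ.take n).filter unm ++ (occ.drop n).filter unm = occ.drop n := by
    rw [← List.filter_append, ← hsplit, hold]
  rcases h : (occ.take n).filter unm with _ | ⟨x, xs⟩
  · rw [h, List.nil_append] at hf
    exact ⟨rfl, hf⟩
  · exfalso
    have hx1 : x ∈ occ.take n := List.mem_of_mem_filter (h ▸ List.mem_cons_self)
    have hx2 : x ∈ occ.drop n := by
      rw [← hf, h]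
      exact List.mem_append_left _ List.mem_cons_self
    have hdisj := (List.nodup_append.mp (hsplit ▸ hnd)).2.2
    exact hdisj x hx1 x hx2 rfl
theorem filter_drop_step {occ : List Nat} {unm unm' : Nat → Bool} {n : Nat}
    (hnd : occ.Nodup) (hn : n < occ.length)
    (hold : occ.filter unm = occ.drop n)
    (hj : unm' occ[n] = false)
    (hother : ∀ x ∈ occ, x ≠ occ[n] → unm' x = unm x) :
    occ.filter unm' = occ.drop (n + 1) := by
  obtain ⟨h1, h2⟩ := filter_split hnd hold
  have hdropn : occ.drop n = occ[n] :: occ.drop (n + 1) := List.drop_eq_getElem_cons hn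
  have hsplit : occ = occ.take n ++ occ.drop n := (List.take_append_drop n occ).symm
  have hnd2 : (occ.drop n).Nodup := hnd.sublist (List.drop_sublist n occ)
  have hnotmem : occ[n] ∉ occ.drop (n + 1) := by
    rw [hdropn] at hnd2
    exact (List.nodup_cons.mp hnd2).1
  have hdisj := (List.nodup_append.mp (hsplit ▸ hnd)).2.2
  have hmemdrop : ∀ x ∈ occ.drop (n+1), x ∈ occ := fun x hx =>
    List.mem_of_mem_drop hx
  calc occ.filter unm'
      = (occ.take n).filter unm' ++ (occ.drop n).filter unm' := by
        rw [← List.filter_append, ← hsplit]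
    _ = occ.drop (n + 1) := by
        have ht : (occ.take n).filter unm' = [] := by
          rw [List.filter_eq_nil_iff]
          intro x hx
          have hne : x ≠ occ[n] := by
            intro he
            exact hdisj x hx occ[n] (hdropn ▸ List.mem_cons_self) he
          rw [hother x (List.mem_of_mem_take hx) hne]
          have := List.filter_eq_nil_iff.mp h1 x hx
          simpa using this
        have hd : (occ.drop n).filter unm' = occ.drop (n + 1) := by
          rw [hdropn, List.filter_cons_of_neg (by simp [hj]), List.filter_eq_self.mpr]
          intro x hx
          rw [hother x (hmemdrop x hx) (fun he => hnotmem (he ▸ hx))]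
          have hxdn : x ∈ occ.drop n := by rw [hdropn]; exact List.mem_cons_of_mem _ hx
          exact List.filter_eq_self.mp h2 x hxdn
        rw [ht, hd, List.nil_append]
theorem set_append_len (acc : List (List Int)) (x : List Int) (rest : List (List Int)) (v : List Int) :
    (acc ++ x :: rest).set acc.length v = acc ++ v :: rest := by
  rw [List.set_append]
  simp
theorem getD_append_len (acc : List (List Int)) (x : List Int) (rest : List (List Int)) :
    (acc ++ x :: rest).getD acc.length [] = x := by
  rw [List.getD_eq_getElem?_getD, List.getElem?_append_right (le_refl _)]
  simp
theorem setApp_append_len (acc : List (List Int)) (rest : List (List Int)) (v : Int) :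
    setApp (acc ++ [] :: rest) acc.length v = (acc ++ [[v]]) ++ rest := by
  rw [setApp, getD_append_len, set_append_len]
  simp
theorem getD_setApp (l : List (List Int)) (i k : Nat) (v : Int) (hi : i < l.length) :
    (setApp l i v).getD k [] = if k = i then l.getD i [] ++ [v] else l.getD k [] := by
  unfold setApp
  by_cases h : k = i
  · subst h
    rw [if_pos rfl, List.getD_eq_getElem?_getD, List.getElem?_set_self hi]
    simp
  · rw [if_neg h, List.getD_eq_getElem?_getD, List.getElem?_set_ne (fun he => h he.symm),
      List.getD_eq_getElem?_getD]
theorem length_setApp (l : List (List Int)) (i : Nat) (v : Int) :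
    (setApp l i v).length = l.length := by simp [setApp]
theorem mem_occIdx {ref : List String} {w : String} {x : Nat} :
    x ∈ occIdx ref w ↔ x < ref.length ∧ ref.getD x "" = w := by
  simp [occIdx, List.mem_filter, List.mem_range]

theorem phase1_eq (ref : List String) :
    ∀ (ts : List String) (acc r2t : List (List Int)) (seen : PySem.Dict String Int)
      (cnt : String → Nat),
      r2t.length = ref.length →
      (∀ w, (occIdx ref w).filter (fun j => r2t.getD j [] == []) = (occIdx ref w).drop (cnt w)) →
      (∀ w, seen.getD w 0 = (cnt w : Int)) →
      phase1A ref ts acc.length (acc ++ List.replicate ts.length [], r2t)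
        = phase1B (occB ref) ts acc.length acc r2t seen := by
  intro ts
  induction ts with
  | nil => intro acc r2t seen cnt _ _ _; simp [phase1A, phase1B]
  | cons tw ts ih =>
    intro acc r2t seen cnt hlen hinv hseen
    rw [phase1A, phase1B]
    have hocc := occB_getD ref tw
    have hfind : findMatchA tw ref r2t 0 = ((occIdx ref tw).drop (cnt tw)).head? := by
      rw [findMatchA_eq, ← hinv tw]
      congr 1
      rw [occIdx, List.filter_filter]
      apply List.filter_congr
      intro k _
      exact Bool.and_comm _ _
    have hposlen : ((occB ref).getD tw []).length = (occIdx ref tw).length := by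
      rw [hocc, List.length_map]
    set n := cnt tw with hn
    by_cases hlt : n < (occIdx ref tw).length
    · -- matched case
      have hjlt : n < (occIdx ref tw).length := hlt
      have hdrop : (occIdx ref tw).drop n = (occIdx ref tw)[n] :: (occIdx ref tw).drop (n+1) :=
        List.drop_eq_getElem_cons hlt
      set jN := (occIdx ref tw)[n] with hjN
      have hfind' : findMatchA tw ref r2t 0 = some jN := by rw [hfind, hdrop]; rfl
      have hcond : (seen.getD tw 0) < (((occB ref).getD tw []).length : Int) := by
        rw [hseen tw, hposlen]; exact_mod_cast hlt
      have hjval : (PySem.List.pyGet? ((occB ref).getD tw []) (seen.getD tw 0)).getD 0 = (jN : Int) := by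
        rw [hseen tw, hocc, PySem.List.pyGet?_natCast, List.getElem?_map,
          List.getElem?_eq_getElem hlt]
        rfl
      have hjmem : jN ∈ occIdx ref tw := hjN ▸ List.getElem_mem hlt
      have hjref : jN < ref.length ∧ ref.getD jN "" = tw := mem_occIdx.mp hjmem
      have hjr2t : jN < r2t.length := by rw [hlen]; exact hjref.1
      dsimp only
      rw [hfind', if_pos hcond, hjval]
      dsimp only
      have hrep : (List.replicate (tw :: ts).length ([] : List Int))
          = [] :: List.replicate ts.length [] := rfl
      rw [hrep, setApp_append_len, Int.toNat_natCast]
      have hlen1 : acc.length + 1 = (acc ++ [[(jN : Int)]]).length := by simp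
      rw [hlen1]
      apply ih (acc ++ [[(jN : Int)]]) (setApp r2t jN (acc.length : Int))
        (seen.insert tw (seen.getD tw 0 + 1)) (Function.update cnt tw (cnt tw + 1))
      · rw [length_setApp, hlen]
      · intro w
        by_cases hw : w = tw
        · subst hw
          rw [Function.update_self]
          apply filter_drop_step (occIdx_nodup ref w) hlt (hinv w)
          · rw [getD_setApp _ _ _ _ hjr2t, if_pos rfl]
            simp
          · intro x hx hne
            rw [getD_setApp _ _ _ _ hjr2t, if_neg hne]
        · rw [Function.update_of_ne hw, ← hinv w]
          apply List.filter_congr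
          intro x hx
          have hxne : x ≠ jN := by
            intro he
            exact hw (by rw [← (mem_occIdx.mp hx).2, he, hjref.2])
          rw [getD_setApp _ _ _ _ hjr2t, if_neg hxne]
      · intro w
        by_cases hw : w = tw
        · subst hw
          rw [PySem.Dict.getD_insert_self, hseen w, Function.update_self]
          push_cast
          ring
        · rw [PySem.Dict.getD_insert_of_ne _ _ _ hw, hseen w, Function.update_of_ne hw]
    · -- no-match case
      have hdropnil : (occIdx ref tw).drop n = [] := List.drop_eq_nil_of_le (by omega)
      have hfind' : findMatchA tw ref r2t 0 = none := by rw [hfind, hdropnil]; rfl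
      have hcond : ¬ (seen.getD tw 0) < (((occB ref).getD tw []).length : Int) := by
        rw [hseen tw, hposlen]
        intro hc
        exact hlt (by exact_mod_cast hc)
      dsimp only
      rw [hfind', if_neg hcond]
      dsimp only
      have hrep : (List.replicate (tw :: ts).length ([] : List Int))
          = [] :: List.replicate ts.length [] := rfl
      have hre : acc ++ [] :: List.replicate ts.length ([] : List Int)
          = (acc ++ [[]]) ++ List.replicate ts.length [] := by simp
      rw [hrep, hre]
      have hlen1 : acc.length + 1 = (acc ++ [([] : List Int)]).length := by simp
      rw [hlen1]
      apply ih (acc ++ [[]]) r2t (seen.insert tw (seen.getD tw 0 + 1))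
        (Function.update cnt tw (cnt tw + 1)) hlen
      · intro w
        by_cases hw : w = tw
        · subst hw
          rw [Function.update_self, hinv w, hdropnil,
            List.drop_eq_nil_of_le (le_trans (Nat.not_lt.mp hlt) (Nat.le_succ _))]
        · rw [Function.update_of_ne hw]
          exact hinv w
      · intro w
        by_cases hw : w = tw
        · subst hw
          rw [PySem.Dict.getD_insert_self, hseen w, Function.update_self]
          push_cast
          ring
        · rw [PySem.Dict.getD_insert_of_ne _ _ _ hw, hseen w, Function.update_of_ne hw]

-- ===== skipB facts =====
theorem skipB_le (r2t : List (List Int)) : ∀ p, p ≤ r2t.length → skipB r2t p ≤ r2t.length := by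
  refine skipB.induct r2t (fun p => p ≤ r2t.length → skipB r2t p ≤ r2t.length) ?_ ?_ ?_
  · intro p h hm _; rw [skipB, dif_pos h, if_pos hm]; omega
  · intro p h hm ih _; rw [skipB, dif_pos h, if_neg hm]; exact ih (by omega)
  · intro p h hp; rw [skipB, dif_neg h]; exact hp

theorem skipB_matched (r2t : List (List Int)) :
    ∀ p, ∀ j, p ≤ j → j < skipB r2t p → ¬ r2t.getD j [] = [] := by
  refine skipB.induct r2t (fun p => ∀ j, p ≤ j → j < skipB r2t p → ¬ r2t.getD j [] = []) ?_ ?_ ?_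
  · intro p h hm j h1 h2; rw [skipB, dif_pos h, if_pos hm] at h2; omega
  · intro p h hm ih j h1 h2
    rw [skipB, dif_pos h, if_neg hm] at h2
    rcases Nat.eq_or_lt_of_le h1 with he | hlt
    · exact he ▸ hm
    · exact ih j hlt h2
  · intro p h j h1 h2; rw [skipB, dif_neg h] at h2; omega

theorem runB_ge (it : Int) : ∀ (r2t : List (List Int)) (q : Nat), q ≤ (runB r2t q it).2 := by
  refine runB.induct it (fun r2t q => q ≤ (runB r2t q it).2) ?_ ?_
  · intro r2t q h ih; rw [runB, dif_pos h]; omega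
  · intro r2t q h; rw [runB, dif_neg h]

theorem runB_le (it : Int) : ∀ (r2t : List (List Int)) (q : Nat),
    q ≤ r2t.length → (runB r2t q it).2 ≤ r2t.length := by
  refine runB.induct it (fun r2t q => q ≤ r2t.length → (runB r2t q it).2 ≤ r2t.length) ?_ ?_
  · intro r2t q h ih _
    rw [runB, dif_pos h]
    have := ih (by rw [length_setApp]; omega)
    rwa [length_setApp] at this
  · intro r2t q h hq; rw [runB, dif_neg h]; exact hq

theorem runB_len (it : Int) : ∀ (r2t : List (List Int)) (q : Nat),
    (runB r2t q it).1.length = r2t.length := by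
  refine runB.induct it (fun r2t q => (runB r2t q it).1.length = r2t.length) ?_ ?_
  · intro r2t q h ih; rw [runB, dif_pos h, ih, length_setApp]
  · intro r2t q h; rw [runB, dif_neg h]

theorem runB_getD (it : Int) : ∀ (r2t : List (List Int)) (q : Nat),
    ∀ j, (runB r2t q it).1.getD j [] =
      if q ≤ j ∧ j < (runB r2t q it).2 then [it] else r2t.getD j [] := by
  refine runB.induct it (fun r2t q => ∀ j, (runB r2t q it).1.getD j [] =
      if q ≤ j ∧ j < (runB r2t q it).2 then [it] else r2t.getD j [] ) ?_ ?_
  · intro r2t q h ih j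
    have hstep : runB r2t q it = runB (setApp r2t q it) (q + 1) it := by
      conv_lhs => rw [runB, dif_pos h]
    rw [hstep, ih j]
    by_cases hj : q + 1 ≤ j ∧ j < (runB (setApp r2t q it) (q + 1) it).2
    · rw [if_pos hj, if_pos (by omega)]
    · rw [if_neg hj]
      by_cases hje : j = q
      · subst hje
        have hge := runB_ge it (setApp r2t j it) (j + 1)
        rw [getD_setApp _ _ _ _ h.1, if_pos rfl, h.2, List.nil_append,
          if_pos ⟨le_refl _, by omega⟩]
      · rw [getD_setApp _ _ _ _ h.1, if_neg hje,
          if_neg (fun hc => hj ⟨by omega, hc.2⟩)]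
  · intro r2t q h j
    rw [runB, dif_neg h]
    rw [if_neg (by omega)]

-- ===== findStA bridging =====
theorem findStA_drop (ref : List String) (r2t : List (List Int))
    (hlen : r2t.length = ref.length) :
    ∀ p, findStA (ref.drop p) r2t p =
      (if skipB r2t p < r2t.length then ((skipB r2t p : Nat) : Int) else -1) := by
  refine skipB.induct r2t (fun p => findStA (ref.drop p) r2t p =
      (if skipB r2t p < r2t.length then ((skipB r2t p : Nat) : Int) else -1)) ?_ ?_ ?_
  · intro p h hm
    rw [skipB, dif_pos h, if_pos hm]
    have hp : p < ref.length := by omega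
    rw [List.drop_eq_getElem_cons hp, findStA, if_pos hm, if_pos h]
  · intro p h hm ih
    rw [skipB, dif_pos h, if_neg hm]
    have hp : p < ref.length := by omega
    rw [List.drop_eq_getElem_cons hp, findStA, if_neg hm]
    exact ih
  · intro p h
    rw [skipB, dif_neg h]
    rw [List.drop_eq_nil_of_le (by omega), findStA, if_neg h]

theorem findStA_prefix (ref : List String) (r2t : List (List Int)) :
    ∀ k, k ≤ ref.length → (∀ j, j < k → ¬ r2t.getD j [] = []) →
      findStA ref r2t 0 = findStA (ref.drop k) r2t k := by
  intro k
  induction k with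
  | zero => intro _ _; rfl
  | succ k ih =>
    intro hk h
    rw [ih (by omega) (fun j hj => h j (by omega))]
    have hkl : k < ref.length := by omega
    rw [List.drop_eq_getElem_cons hkl, findStA, if_neg (h k (by omega))]

-- ===== blockA / runB equality =====
theorem pyIdxN_natCast (len : Nat) (j : Nat) : pyIdxN len (j : Int) = j := by
  rw [pyIdxN, if_neg (by omega)]
  exact Int.toNat_natCast j

theorem setApp_set (l : List (List Int)) (i : Nat) (x : List Int) (v : Int) (hi : i < l.length) :
    setApp (l.set i x) i v = l.set i (x ++ [v]) := by
  rw [setApp, List.getD_eq_getElem?_getD, List.getElem?_set_self hi]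
  simp [List.set_set]

theorem blockA_eq (ref : List String) (i_t : Nat) (p' : Nat) :
    ∀ (fuel : Nat) (j : Nat) (r2t t2r : List (List Int)),
      r2t.length = ref.length →
      i_t < t2r.length →
      ref.length - j ≤ fuel →
      p' ≤ j →
      blockA (ref.drop j) (p' : Int) (j - p') i_t (t2r.set i_t (PySem.List.pyRange (p' : Int) (j : Int) 1), r2t)
        = (t2r.set i_t (PySem.List.pyRange (p' : Int) ((runB r2t j (i_t : Int)).2 : Int) 1),
           (runB r2t j (i_t : Int)).1) := by
  intro fuel
  induction fuel with
  | zero =>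
    intro j r2t t2r hlen hit hf hp
    have hj : ref.length ≤ j := by omega
    rw [List.drop_eq_nil_of_le hj, blockA, runB, dif_neg (by omega)]
  | succ fuel ih =>
    intro j r2t t2r hlen hit hf hp
    rcases Nat.lt_or_ge j ref.length with hj | hj
    · rw [List.drop_eq_getElem_cons hj, blockA]
      have hidx : (p' : Int) + ((j - p' : Nat) : Int) = (j : Int) := by omega
      rw [hidx]
      have hget : PySem.List.pyGetD (t2r.set i_t (PySem.List.pyRange (p' : Int) (j : Int) 1), r2t).2 (j : Int) [] = r2t.getD j [] := by
        exact PySem.List.pyGetD_natCast r2t j []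
      by_cases hm : r2t.getD j [] = []
      · rw [if_neg (by rw [hget]; simpa using hm)]
        have hstep : runB r2t j (i_t : Int) = runB (setApp r2t j (i_t : Int)) (j + 1) (i_t : Int) := by
          conv_lhs => rw [runB, dif_pos ⟨by omega, hm⟩]
        rw [hstep]
        have ht2r : setApp (t2r.set i_t (PySem.List.pyRange (p' : Int) (j : Int) 1), r2t).1 i_t (j : Int)
            = t2r.set i_t (PySem.List.pyRange (p' : Int) (((j + 1 : Nat) : Int)) 1) := by
          show setApp (t2r.set i_t (PySem.List.pyRange (p' : Int) (j : Int) 1)) i_t (j : Int)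
            = t2r.set i_t (PySem.List.pyRange (p' : Int) (((j + 1 : Nat) : Int)) 1)
          rw [setApp_set _ _ _ _ hit]
          congr 1
          rw [Nat.cast_add, Nat.cast_one,
            PySem.List.pyRange_one_succ_right (by exact_mod_cast Int.ofNat_le.mpr hp)]
        have hr2t : setAppI (t2r.set i_t (PySem.List.pyRange (p' : Int) (j : Int) 1), r2t).2 (j : Int) (i_t : Int)
            = setApp r2t j (i_t : Int) := by
          show setAppI r2t (j : Int) (i_t : Int) = setApp r2t j (i_t : Int)
          rw [setAppI, pyIdxN_natCast]
        rw [ht2r, hr2t]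
        have harg : j - p' + 1 = (j + 1) - p' := by omega
        rw [harg]
        exact ih (j + 1) (setApp r2t j (i_t : Int)) t2r
          (by rw [length_setApp]; exact hlen) hit (by omega) (by omega)
      · rw [if_pos (by rw [hget]; simpa using hm), runB, dif_neg (by intro hc; exact hm hc.2)]
    · rw [List.drop_eq_nil_of_le hj, blockA, runB, dif_neg (by omega)]

theorem set_empty_self (l : List (List Int)) (i : Nat) (h : l.getD i [] = []) :
    l.set i [] = l := by
  apply List.ext_getElem?
  intro k
  by_cases hi : i < l.length
  · by_cases hk : k = i
    · subst hk
      rw [List.getElem?_set_self hi, List.getElem?_eq_getElem hi]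
      rw [List.getD_eq_getElem?_getD, List.getElem?_eq_getElem hi] at h
      rw [← h]
      rfl
    · rw [List.getElem?_set_ne (fun he => hk he.symm)]
  · rw [List.set_eq_of_length_le (by omega)]

theorem blockA_neg_one (ref : List String) (r2t t2r : List (List Int)) (i_t : Nat)
    (hlen : r2t.length = ref.length)
    (hall : ∀ j, j < r2t.length → ¬ r2t.getD j [] = []) :
    blockA (PySem.List.slice ref (some (-1)) none) (-1) 0 i_t (t2r, r2t) = (t2r, r2t) := by
  rw [PySem.List.slice_some_none, PySem.List.clampIdx_neg_one]
  rcases List.eq_nil_or_concat ref with hnil | ⟨ys, y, hy⟩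
  · subst hnil
    rw [List.drop_nil, blockA]
  · have hR : 0 < ref.length := by subst hy; simp
    have hlt : ref.length - 1 < ref.length := by omega
    rw [List.drop_eq_getElem_cons hlt, blockA]
    have hne : r2t ≠ [] := by
      intro hc
      rw [hc] at hlen
      simp at hlen
      omega
    have hidx : (-1 : Int) + ((0 : Nat) : Int) = -1 := by norm_num
    rw [if_pos (by
      rw [hidx, PySem.List.pyGetD_neg_one _ _ hne, List.getLast_eq_getElem]
      have := hall (r2t.length - 1) (by omega)
      rw [List.getD_eq_getElem?_getD, List.getElem?_eq_getElem (by omega)] at this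
      simpa using this)]

theorem phase2_eq (ref : List String) :
    ∀ (ts : List String) (i_t p : Nat) (t2r r2t : List (List Int)),
      r2t.length = ref.length →
      t2r.length = i_t + ts.length →
      p ≤ r2t.length →
      (∀ j, j < p → ¬ r2t.getD j [] = []) →
      phase2A ref ts i_t (t2r, r2t) = phase2B ts i_t p (t2r, r2t) := by
  intro ts
  induction ts with
  | nil => intro i_t p t2r r2t _ _ _ _; rfl
  | cons tw ts ih =>
    intro i_t p t2r r2t hlen hlen2 hple hp
    rw [phase2A, phase2B]
    dsimp only
    by_cases hm : t2r.getD i_t [] = []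
    · rw [if_pos hm, if_neg (not_not_intro hm)]
      have hit : i_t < t2r.length := by simp at hlen2; omega
      have hall' : ∀ j, j < skipB r2t p → ¬ r2t.getD j [] = [] := by
        intro j hj
        rcases Nat.lt_or_ge j p with h1 | h1
        · exact hp j h1
        · exact skipB_matched r2t p j h1 hj
      have hfind : findStA ref r2t 0 =
          (if skipB r2t p < r2t.length then ((skipB r2t p : Nat) : Int) else -1) := by
        rw [findStA_prefix ref r2t p (by omega) hp, findStA_drop ref r2t hlen p]
      have hsle : skipB r2t p ≤ r2t.length := skipB_le r2t p hple
      have hsnil : t2r.set i_t (PySem.List.pyRange ((skipB r2t p : Nat) : Int) ((skipB r2t p : Nat) : Int) 1) = t2r := by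
        rw [PySem.List.pyRange_one_eq_nil (le_refl _)]
        exact set_empty_self t2r i_t hm
      rcases Nat.lt_or_ge (skipB r2t p) r2t.length with hcase | hcase
      · -- an unmatched ref position exists
        rw [hfind, if_pos hcase, PySem.List.slice_from_natCast]
        have hA := blockA_eq ref i_t (skipB r2t p) (ref.length - skipB r2t p) (skipB r2t p)
          r2t t2r hlen hit (le_refl _) (le_refl _)
        rw [Nat.sub_self] at hA
        conv_lhs => rw [← hsnil]
        rw [hA]
        apply ih (i_t + 1) (runB r2t (skipB r2t p) (i_t : Int)).2
        · rw [runB_len]; exact hlen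
        · rw [List.length_set]; simp at hlen2 ⊢; omega
        · rw [runB_len]; exact runB_le _ _ _ hsle
        · intro j hj
          rw [runB_getD]
          by_cases hin : skipB r2t p ≤ j ∧ j < (runB r2t (skipB r2t p) (i_t : Int)).2
          · rw [if_pos hin]; simp
          · rw [if_neg hin]
            exact hall' j (by omega)
      · -- all ref positions already matched
        have hpR : skipB r2t p = r2t.length := by omega
        rw [hfind, if_neg (by omega)]
        rw [blockA_neg_one ref r2t t2r i_t hlen (fun j hj => hall' j (by omega))]
        have hrun : runB r2t (skipB r2t p) (i_t : Int) = (r2t, skipB r2t p) := by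
          rw [runB, dif_neg (by intro hc; omega)]
        rw [hrun]
        dsimp only
        rw [hsnil]
        apply ih (i_t + 1) (skipB r2t p) t2r r2t hlen (by simp at hlen2 ⊢; omega)
          (by omega) (fun j hj => hall' j hj)
    · rw [if_neg hm, if_pos hm]
      exact ih (i_t + 1) p t2r r2t hlen (by simp at hlen2 ⊢; omega) hple hp

theorem phase1A_len (ref : List String) :
    ∀ (ts : List String) (i : Nat) (s : List (List Int) × List (List Int)),
      (phase1A ref ts i s).1.length = s.1.length ∧ (phase1A ref ts i s).2.length = s.2.length := by
  intro ts
  induction ts with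
  | nil => intro i s; exact ⟨rfl, rfl⟩
  | cons tw ts ih =>
    intro i s
    rw [phase1A]
    cases hf : findMatchA tw ref s.2 0 with
    | none =>
      dsimp only
      exact ih (i + 1) s
    | some j =>
      dsimp only
      obtain ⟨h1, h2⟩ := ih (i + 1) (setApp s.1 i (j : Int), setApp s.2 j (i : Int))
      rw [h1, h2]
      exact ⟨length_setApp _ _ _, length_setApp _ _ _⟩

-- ===== VERDICT (by name: the statement is the Claim_ definition above) =====
theorem map_transcripts_py_spec : Claim_equal_map_transcripts_py := by
  intro trg ref _
  unfold Spec_map_transcripts_py map_transcripts_py map_transcripts_py_alt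
  have hrepl : (List.replicate ref.length ([] : List Int)).length = ref.length := by simp
  have h1 : phase1A ref trg 0
        ([] ++ List.replicate trg.length [], List.replicate ref.length [])
      = phase1B (occB ref) trg 0 [] (List.replicate ref.length []) PySem.Dict.empty := by
    have := phase1_eq ref trg [] (List.replicate ref.length []) PySem.Dict.empty
      (fun _ => 0) hrepl
      (by
        intro w
        rw [List.drop_zero, List.filter_eq_self]
        intro j hj
        simp [List.getD_eq_getElem?_getD, List.getElem?_replicate]
        split <;> rfl)
      (by intro w; simp [PySem.Dict.getD_empty])
    simpa using this
  rw [List.nil_append] at h1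
  rw [← h1]
  obtain ⟨hl1, hl2⟩ := phase1A_len ref trg 0
    (List.replicate trg.length [], List.replicate ref.length [])
  set s1 := phase1A ref trg 0 (List.replicate trg.length [], List.replicate ref.length []) with hs1
  have := phase2_eq ref trg 0 0 s1.1 s1.2
    (by rw [hl2]; exact hrepl)
    (by rw [hl1]; simp)
    (by omega)
    (by intro j hj; omega)
  simpa using this
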